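-- pv_equiv track=rewrite | github.com/MinuteCrisis/intraday-stock-scanner | main.py | _suggested_bias
-- ===== SOURCE A (Python) =====
-- from typing import Dict, Iterable, List, Sequence, Tuple
--
-- def _suggested_bias(signals: Sequence[str], market_trend: str) -> str:
--     short_signals = {
--         "VWAP breakdown",
--         "VWAP rejection",
--         "support break",
--         "Opening Range Breakdown",
--         "price drop",
--         "market bearish",
--         "gap down",
--     }
--     long_signals = {
--         "Opening Range Breakout",
--         "RSI oversold",
--         "gap up",
--     }
--     short_score = sum(1 for signal in signals if signal in short_signals)
--     long_score = sum(1 for signal in signals if signal in long_signals)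
--     if market_trend == "bearish":
--         short_score += 1
--     if short_score >= long_score:
--         return "SHORT"
--     return "LONG"
-- ===== SOURCE B (Python) =====
-- _SHORT = (
--     "VWAP breakdown",
--     "VWAP rejection",
--     "support break",
--     "Opening Range Breakdown",
--     "price drop",
--     "market bearish",
--     "gap down",
-- )
-- _LONG = (
--     "Opening Range Breakout",
--     "RSI oversold",
--     "gap up",
-- )
--
--
-- def _suggested_bias(signals, market_trend):
--     # Index the input once as a histogram, then score by looking up the
--     # fixed keyword lists -- no per-set scan over signals.
--     counts = {}
--     for sig in signals:
--         counts[sig] = counts.get(sig, 0) + 1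
--     short_score = sum(counts.get(k, 0) for k in _SHORT)
--     if market_trend == "bearish":
--         short_score += 1
--     long_score = sum(counts.get(k, 0) for k in _LONG)
--     return "SHORT" if short_score >= long_score else "LONG"
-- ===== Notes on version B (the rewrite author's own statement) =====
-- stated objective: alternative
-- what changed: B builds a histogram of the signals once and then scores by iterating over the fixed keyword lists with dict lookups, instead of A's two membership-test passes over the signals; the per-set scans over the input disappear.
import Mathlib
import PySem

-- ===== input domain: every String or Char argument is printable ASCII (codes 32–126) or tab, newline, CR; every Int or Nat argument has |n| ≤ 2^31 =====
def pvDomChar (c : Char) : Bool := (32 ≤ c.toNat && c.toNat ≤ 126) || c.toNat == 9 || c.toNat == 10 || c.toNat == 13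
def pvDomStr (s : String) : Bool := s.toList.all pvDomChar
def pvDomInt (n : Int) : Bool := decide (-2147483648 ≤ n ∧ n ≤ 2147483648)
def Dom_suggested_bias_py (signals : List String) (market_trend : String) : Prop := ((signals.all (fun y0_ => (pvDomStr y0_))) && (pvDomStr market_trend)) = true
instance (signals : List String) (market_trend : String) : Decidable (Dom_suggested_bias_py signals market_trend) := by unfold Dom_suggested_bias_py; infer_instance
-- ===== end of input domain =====

-- B indexes the signals once as a histogram dict and then scores by iterating
-- over the fixed keyword lists, instead of A's two membership-test passes over
-- the signals (objective: alternative traversal of the same cost).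

-- ===== PORT A =====
def pvShortSignals : PySem.Set String :=
  PySem.Set.ofList ["VWAP breakdown", "VWAP rejection", "support break",
    "Opening Range Breakdown", "price drop", "market bearish", "gap down"]

def pvLongSignals : PySem.Set String :=
  PySem.Set.ofList ["Opening Range Breakout", "RSI oversold", "gap up"]

def suggested_bias_py (signals : List String) (market_trend : String) : String :=
  let short_score : Int :=
    signals.foldl (fun acc signal => acc + (if PySem.Set.contains pvShortSignals signal then 1 else 0)) 0
  let long_score : Int :=
    signals.foldl (fun acc signal => acc + (if PySem.Set.contains pvLongSignals signal then 1 else 0)) 0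
  let short_score := if market_trend == "bearish" then short_score + 1 else short_score
  if short_score ≥ long_score then "SHORT" else "LONG"

-- ===== PORT B =====
def pvShortList : List String :=
  ["VWAP breakdown", "VWAP rejection", "support break",
   "Opening Range Breakdown", "price drop", "market bearish", "gap down"]

def pvLongList : List String := ["Opening Range Breakout", "RSI oversold", "gap up"]

def suggested_bias_py_alt (signals : List String) (market_trend : String) : String :=
  let counts : PySem.Dict String Int :=
    signals.foldl (fun d sig => d.insert sig (d.getD sig 0 + 1)) PySem.Dict.empty
  let short_score : Int := pvShortList.foldl (fun acc k => acc + counts.getD k 0) 0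
  let short_score := if market_trend == "bearish" then short_score + 1 else short_score
  let long_score : Int := pvLongList.foldl (fun acc k => acc + counts.getD k 0) 0
  if short_score ≥ long_score then "SHORT" else "LONG"

-- ===== PRECONDITION & SPEC =====
def Spec_suggested_bias_py (signals : List String) (market_trend : String) (out : String) : Prop := out = suggested_bias_py_alt signals market_trend
instance (signals : List String) (market_trend : String) (out : String) : Decidable (Spec_suggested_bias_py signals market_trend out) := by unfold Spec_suggested_bias_py; infer_instance

-- ===== CLAIM (what is proved, stated in full; the proofs are below) =====
def Claim_equal_suggested_bias_py : Prop := ∀ (signals : List String) (market_trend : String), Dom_suggested_bias_py signals market_trend → Spec_suggested_bias_py signals market_trend (suggested_bias_py signals market_trend)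

-- ===== LEMMAS AND PROOFS =====

-- a sum-accumulating foldl pulls its initial value out front
lemma pv_foldl_add (f : String → Int) :
    ∀ (keys : List String) (c : Int),
      keys.foldl (fun a k => a + f k) c = c + (keys.map f).sum := by
  intro keys
  induction keys with
  | nil => intro c; simp
  | cons k rest ih => intro c; simp [List.foldl_cons, ih]; ring

-- with Nodup keys, summing indicator of equality over keys = membership indicator
lemma pv_sum_indicator (s : String) :
    ∀ (keys : List String), keys.Nodup →
      (keys.map (fun k => if k == s then (1 : Int) else 0)).sum =
        if keys.contains s then 1 else 0 := by
  intro keys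
  induction keys with
  | nil => intro _; simp
  | cons k rest ih =>
    intro hnd
    rcases List.nodup_cons.mp hnd with ⟨hk, hrest⟩
    by_cases h : k = s
    · subst h
      have hz : (rest.map (fun k' => if k' == k then (1 : Int) else 0)).sum = 0 := by
        rw [ih hrest]
        simp [List.contains_eq_mem, hk]
      simp only [List.map_cons, List.sum_cons, hz]
      simp
    · simp only [List.map_cons, List.sum_cons, ih hrest]
      simp [h, Ne.symm h]

-- with Nodup keys, summing per-key occurrence counts = counting members
lemma pv_sum_counts (keys : List String) (hnd : keys.Nodup) :
    ∀ (signals : List String),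
      (keys.map (fun k => (signals.count k : Int))).sum =
        (signals.countP (fun s => keys.contains s) : Int) := by
  intro signals
  induction signals with
  | nil => simp
  | cons s rest ih =>
    have hcnt : (keys.map (fun k => ((s :: rest).count k : Int))).sum =
        (keys.map (fun k => (rest.count k : Int))).sum +
        (keys.map (fun k => if k == s then (1 : Int) else 0)).sum := by
      rw [← List.sum_map_add]
      congr 1
      apply List.map_congr_left
      intro k _
      rw [List.count_cons]
      push_cast
      by_cases h : k = s
      · simp [h]
      · simp [h, Ne.symm h]
    rw [hcnt, ih, pv_sum_indicator s keys hnd, List.countP_cons]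
    push_cast
    ring

-- A's membership-test pass = count of members
lemma pv_foldl_indicator (p : String → Bool) :
    ∀ (signals : List String) (c : Int),
      signals.foldl (fun a sig => a + (if p sig then (1 : Int) else 0)) c =
        c + (signals.countP p : Int) := by
  intro signals
  induction signals with
  | nil => intro c; simp
  | cons s rest ih =>
    intro c
    rw [List.foldl_cons, ih, List.countP_cons]
    by_cases h : p s
    · simp [h]; ring
    · simp [h]

-- B's histogram lookup is the occurrence count
lemma pv_hist_getD (signals : List String) (k : String) :
    (signals.foldl (fun d sig => d.insert sig (d.getD sig 0 + 1)) PySem.Dict.empty).getD k 0 =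
      (signals.count k : Int) := by
  rw [PySem.Dict.getD_foldl_insert_add_one]
  simp [PySem.Dict.getD_empty]

-- one side's whole score computation, A-form = B-form
lemma pv_score_eq (set : PySem.Set String) (keys : List String)
    (hset : set = keys) (hnd : keys.Nodup) (signals : List String) :
    signals.foldl (fun acc signal => acc + (if PySem.Set.contains set signal then (1 : Int) else 0)) 0 =
      keys.foldl (fun acc k => acc +
        (signals.foldl (fun d sig => d.insert sig (d.getD sig 0 + 1)) PySem.Dict.empty).getD k 0) 0 := by
  have hB : keys.foldl (fun acc k => acc +
      (signals.foldl (fun d sig => d.insert sig (d.getD sig 0 + 1)) PySem.Dict.empty).getD k 0) 0 =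
      (keys.map (fun k => (signals.count k : Int))).sum := by
    rw [pv_foldl_add (fun k =>
      (signals.foldl (fun d sig => d.insert sig (d.getD sig 0 + 1)) PySem.Dict.empty).getD k 0) keys 0]
    simp only [zero_add]
    congr 1
    apply List.map_congr_left
    intro k _
    exact pv_hist_getD signals k
  rw [hB, pv_sum_counts keys hnd signals,
    pv_foldl_indicator (fun s => PySem.Set.contains set s) signals 0]
  simp only [zero_add]
  congr 2
  funext s
  simp [PySem.Set.contains, hset]

-- ===== VERDICT (by name: the statement is the Claim_ definition above) =====
theorem suggested_bias_py_spec : Claim_equal_suggested_bias_py := by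
  intro signals market_trend _
  unfold Spec_suggested_bias_py suggested_bias_py suggested_bias_py_alt
  rw [pv_score_eq pvShortSignals pvShortList (by decide) (by decide) signals,
      pv_score_eq pvLongSignals pvLongList (by decide) (by decide) signals]
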